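-- pv_equiv track=rewrite | github.com/heerucan/PS | 프로그래머스/1/140108. 문자열 나누기/문자열 나누기.py | solution
-- ===== SOURCE A (Python) =====
-- def solution(s):
--     answer = 0
--     xCnt, yCnt = 0, 0
--
--     for i in s:
--         if xCnt == yCnt:
--             answer += 1
--             k = i
--         if i == k:
--             xCnt += 1
--         else:
--             yCnt += 1
--
--     return answer
-- ===== SOURCE B (Python) =====
-- def solution(s):
--     answer = 0
--     i = 0
--     n = len(s)
--     while i < n:
--         answer += 1
--         c = s[i]
--         same = 0
--         diff = 0
--         while i < n:
--             if s[i] == c: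
--                 same += 1
--             else:
--                 diff += 1
--             i += 1
--             if same == diff:
--                 break
--     return answer
-- ===== Notes on version B (the rewrite author's own statement) =====
-- stated objective: alternative
-- what changed: Replaced A's single flat pass with global never-reset counters and a carried anchor by an explicit segmentation: an outer loop per group and an inner loop counting same/diff from zero that breaks on balance.
import Mathlib
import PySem

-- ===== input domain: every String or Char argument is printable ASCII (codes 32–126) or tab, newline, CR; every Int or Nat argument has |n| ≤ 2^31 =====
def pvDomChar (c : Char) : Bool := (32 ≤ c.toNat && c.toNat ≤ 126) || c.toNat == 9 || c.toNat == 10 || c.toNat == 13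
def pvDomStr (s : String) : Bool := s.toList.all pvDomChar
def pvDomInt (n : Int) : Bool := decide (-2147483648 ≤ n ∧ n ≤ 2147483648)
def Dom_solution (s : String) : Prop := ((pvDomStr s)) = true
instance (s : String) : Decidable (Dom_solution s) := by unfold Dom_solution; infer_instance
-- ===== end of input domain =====

-- B restructures A's flat stateful pass as an outer loop over groups with an inner loop counting same/diff per group; same values, alternative decomposition.

-- ===== PORT A =====
-- Python's `k` is unassigned before the loop, but the first iteration always assigns it
-- (0 == 0); the dummy initial ' ' is never compared before being overwritten.
def solutionLoop : List Char → Int → Int → Int → Char → Int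
  | [], answer, _, _, _ => answer
  | i :: rest, answer, xCnt, yCnt, k =>
    let answer' := if xCnt == yCnt then answer + 1 else answer
    let k' := if xCnt == yCnt then i else k
    if i == k' then solutionLoop rest answer' (xCnt + 1) yCnt k'
    else solutionLoop rest answer' xCnt (yCnt + 1) k'

def solution (s : String) : Int := solutionLoop s.toList 0 0 0 ' '

-- ===== PORT B =====
-- inner while loop of Source B: consume chars counting same/diff, break when balanced;
-- returns the remaining suffix (the value of index i as a suffix of the list).
def solInner (c : Char) : List Char → Int → Int → List Char
  | [], _, _ => []
  | x :: rest, same, diff =>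
    let same' := if x == c then same + 1 else same
    let diff' := if x == c then diff else diff + 1
    if same' == diff' then rest else solInner c rest same' diff'

theorem solInner_length_le (c : Char) : ∀ (l : List Char) (s d : Int),
    (solInner c l s d).length ≤ l.length := by
  intro l
  induction l with
  | nil => intro s d; simp [solInner]
  | cons x rest ih =>
    intro s d
    simp only [solInner, List.length_cons]
    by_cases h1 : (x == c) = true
    · simp only [h1, if_true]
      split
      · omega
      · exact Nat.le_succ_of_le (ih _ _)
    · rw [Bool.not_eq_true] at h1
      simp only [h1, Bool.false_eq_true, if_false]
      split
      · omega
      · exact Nat.le_succ_of_le (ih _ _)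

theorem solInner_length_lt (c x : Char) (rest : List Char) (s d : Int) :
    (solInner c (x :: rest) s d).length < (x :: rest).length := by
  simp only [solInner, List.length_cons]
  by_cases h1 : (x == c) = true
  · simp only [h1, if_true]
    split
    · omega
    · exact Nat.lt_succ_of_le (solInner_length_le c rest _ _)
  · rw [Bool.not_eq_true] at h1
    simp only [h1, Bool.false_eq_true, if_false]
    split
    · omega
    · exact Nat.lt_succ_of_le (solInner_length_le c rest _ _)

-- outer while loop of Source B: one group per iteration.
def solOuter : List Char → Int
  | [] => 0
  | c :: rest => 1 + solOuter (solInner c (c :: rest) 0 0)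
  termination_by l => l.length
  decreasing_by exact solInner_length_lt c c rest 0 0

def solution_alt (s : String) : Int := solOuter s.toList

-- ===== PRECONDITION & SPEC =====
def Spec_solution (s : String) (out : Int) : Prop := out = solution_alt s
instance (s : String) (out : Int) : Decidable (Spec_solution s out) := by unfold Spec_solution; infer_instance

-- ===== CLAIM (what is proved, stated in full; the proofs are below) =====
def Claim_equal_solution : Prop := ∀ (s : String), Dom_solution s → Spec_solution s (solution s)

-- ===== LEMMAS AND PROOFS =====

-- Mutual invariant: at a group boundary (xCnt = yCnt) A's remaining loop adds solOuter of
-- the rest; mid-group (xCnt - yCnt = same - diff ≠ 0) it adds solOuter of the suffix solInner yields.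
theorem solution_main : ∀ (l : List Char),
    (∀ (ans x : Int) (k : Char), solutionLoop l ans x x k = ans + solOuter l) ∧
    (∀ (ans x y : Int) (c : Char) (s d : Int), x - y = s - d → s ≠ d →
      solutionLoop l ans x y c = ans + solOuter (solInner c l s d)) := by
  intro l
  induction l with
  | nil =>
    constructor
    · intro ans x k; simp [solutionLoop, solOuter]
    · intro ans x y c s d _ _; simp [solutionLoop, solInner, solOuter]
  | cons i rest ih =>
    obtain ⟨Mr, Ir⟩ := ih
    constructor
    · intro ans x k
      simp only [solutionLoop, beq_self_eq_true, if_true]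
      rw [Ir (ans + 1) (x + 1) x i 1 0 (by omega) (by omega)]
      simp only [solOuter, solInner, beq_self_eq_true, if_true]
      rw [if_neg (by decide : ¬ (((0 : Int) + 1 == 0) = true))]
      norm_num
      ring
    · intro ans x y c s d hxy hsd
      have hne : x ≠ y := by omega
      simp only [solutionLoop, solInner]
      have hb : (x == y) = false := by simp [hne]
      rw [hb]
      simp only [Bool.false_eq_true, if_false]
      by_cases hic : (i == c) = true
      · rw [hic]
        simp only [if_true]
        by_cases hsd' : s + 1 = d
        · have hxy' : x + 1 = y := by omega
          rw [show ((s + 1 : Int) == d) = true by simp [hsd']]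
          simp only [if_true]
          rw [show y = x + 1 from hxy'.symm] at *
          exact Mr ans (x + 1) c
        · rw [show ((s + 1 : Int) == d) = false by simp [hsd']]
          simp only [Bool.false_eq_true, if_false]
          exact Ir ans (x + 1) y c (s + 1) d (by omega) hsd'
      · rw [Bool.not_eq_true] at hic
        rw [hic]
        simp only [Bool.false_eq_true, if_false]
        by_cases hsd' : s = d + 1
        · have hxy' : x = y + 1 := by omega
          rw [show ((s : Int) == d + 1) = true by simp [hsd']]
          simp only [if_true]
          rw [show x = y + 1 from hxy']
          exact Mr ans _ c
        · rw [show ((s : Int) == d + 1) = false by simp [hsd']]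
          simp only [Bool.false_eq_true, if_false]
          exact Ir ans x (y + 1) c s (d + 1) (by omega) hsd'

-- ===== VERDICT (by name: the statement is the Claim_ definition above) =====
theorem solution_spec : Claim_equal_solution := by
  intro s _
  unfold Spec_solution solution solution_alt
  rw [(solution_main s.toList).1 0 0 ' ']
  ring
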